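-- pv_equiv track=rewrite | github.com/DreigAguila/QRusaderTrainedModel | zQRScanner/qrScanner.py | has_suspicious_ext
-- ===== SOURCE A (Python) =====
-- def has_suspicious_ext(url):
--     suspicious_ext = [
--         ".exe", ".bat", ".com", ".msi", ".cmd", ".scr",
--         ".zip", ".rar", ".7z", ".tar", ".gz",
--         ".js", ".vbs", ".jar", ".ps1", ".wsf",
--         ".doc", ".docm", ".xls", ".xlsm", ".ppt", ".pptm",
--         ".apk"
--     ]
--     return 1 if any(url.lower().endswith(ext) for ext in suspicious_ext) else 0
-- ===== SOURCE B (Python) =====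
-- _SUSPICIOUS_NAMES = {
--     "exe", "bat", "com", "msi", "cmd", "scr",
--     "zip", "rar", "7z", "tar", "gz",
--     "js", "vbs", "jar", "ps1", "wsf",
--     "doc", "docm", "xls", "xlsm", "ppt", "pptm",
--     "apk",
-- }
--
-- def has_suspicious_ext(url):
--     # single left-to-right pass: track the segment after the most recent dot,
--     # then one O(1) set lookup (instead of 23 endswith scans of the url)
--     seg = None
--     for c in url.lower():
--         if c == '.':
--             seg = []
--         elif seg is not None:
--             seg.append(c)
--     return 1 if seg is not None and ''.join(seg) in _SUSPICIOUS_NAMES else 0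
-- ===== Notes on version B (the rewrite author's own statement) =====
-- stated objective: alternative
-- what changed: Replaces the 23 endswith scans of the lowercased url by a single left-to-right pass that tracks the segment after the most recent dot, followed by one set-membership test of that segment.
import Mathlib
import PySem

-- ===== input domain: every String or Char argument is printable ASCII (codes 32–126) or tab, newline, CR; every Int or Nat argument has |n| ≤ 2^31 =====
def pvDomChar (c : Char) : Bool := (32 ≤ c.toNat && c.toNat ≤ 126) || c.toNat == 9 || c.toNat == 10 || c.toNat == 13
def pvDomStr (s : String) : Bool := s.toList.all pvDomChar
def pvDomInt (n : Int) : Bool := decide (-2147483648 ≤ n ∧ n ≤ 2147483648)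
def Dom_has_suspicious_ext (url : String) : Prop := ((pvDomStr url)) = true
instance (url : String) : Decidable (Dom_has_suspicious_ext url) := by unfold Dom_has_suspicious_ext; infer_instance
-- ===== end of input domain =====

-- B replaces A's 23 endswith scans of the lowercased url by one left-to-right pass tracking
-- the segment after the most recent dot, followed by a single membership test (alternative algorithm).


-- ===== PORT A =====
def suspiciousExtA : List String :=
  [".exe", ".bat", ".com", ".msi", ".cmd", ".scr",
   ".zip", ".rar", ".7z", ".tar", ".gz",
   ".js", ".vbs", ".jar", ".ps1", ".wsf",
   ".doc", ".docm", ".xls", ".xlsm", ".ppt", ".pptm",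
   ".apk"]

def has_suspicious_ext (url : String) : Int :=
  if suspiciousExtA.any (fun ext => PySem.Str.endswith (PySem.Str.lower url) ext) then 1 else 0

-- ===== PORT B =====
-- the 23 suspicious names, without the leading dot
def suspiciousNamesB : List (List Char) :=
  ["exe", "bat", "com", "msi", "cmd", "scr",
   "zip", "rar", "7z", "tar", "gz",
   "js", "vbs", "jar", "ps1", "wsf",
   "doc", "docm", "xls", "xlsm", "ppt", "pptm",
   "apk"].map String.toList

-- one step of B's scan: a dot starts a fresh segment, any other char extends it (if one is open)
def segStep (st : Option (List Char)) (c : Char) : Option (List Char) :=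
  if c = '.' then some [] else st.map (fun s => s ++ [c])

def has_suspicious_ext_alt (url : String) : Int :=
  let seg := (PySem.Str.lower url).toList.foldl segStep none
  match seg with
  | none => 0
  | some t => if suspiciousNamesB.contains t then 1 else 0

-- ===== PRECONDITION & SPEC =====
def Spec_has_suspicious_ext (url : String) (out : Int) : Prop := out = has_suspicious_ext_alt url
instance (url : String) (out : Int) : Decidable (Spec_has_suspicious_ext url out) := by unfold Spec_has_suspicious_ext; infer_instance

-- ===== CLAIM (what is proved, stated in full; the proofs are below) =====
def Claim_equal_has_suspicious_ext : Prop := ∀ (url : String), Dom_has_suspicious_ext url → Spec_has_suspicious_ext url (has_suspicious_ext url)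

-- ===== LEMMAS AND PROOFS =====

-- B's scan yields `some t` exactly when `'.' :: t` is a dot-free-tailed suffix of the input
theorem foldl_segStep_eq_some_iff (l t : List Char) :
    l.foldl segStep none = some t ↔ ('.' :: t) <:+ l ∧ '.' ∉ t := by
  induction l using List.reverseRecOn generalizing t with
  | nil =>
    simp only [List.foldl_nil]
    constructor
    · intro h; cases h
    · rintro ⟨⟨p, hp⟩, _⟩; simp at hp
  | append_singleton l c ih =>
    rw [List.foldl_append, List.foldl_cons, List.foldl_nil]
    by_cases hc : c = '.'
    · subst hc
      simp only [segStep]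
      constructor
      · rintro h
        cases h
        exact ⟨⟨l, rfl⟩, by simp⟩
      · rintro ⟨⟨p, hp⟩, hnd⟩
        rcases List.eq_nil_or_concat t with ht | ⟨t', x, ht⟩
        · subst ht; rfl
        · subst ht
          rw [List.concat_eq_append] at hp hnd
          rw [show p ++ '.' :: (t' ++ [x]) = (p ++ '.' :: t') ++ [x] by simp] at hp
          rcases List.append_singleton_inj.mp hp with ⟨-, hx⟩
          exact absurd (by simp [hx]) hnd
    · simp only [segStep, if_neg hc]
      constructor
      · intro h
        rcases Option.map_eq_some_iff.mp h with ⟨t', h', rfl⟩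
        rcases (ih t').mp h' with ⟨⟨p, hp⟩, hnd⟩
        refine ⟨⟨p, by simp [← hp]⟩, ?_⟩
        simp only [List.mem_append, List.mem_singleton]
        rintro (h | h)
        · exact hnd h
        · exact hc h.symm
      · rintro ⟨⟨p, hp⟩, hnd⟩
        rcases List.eq_nil_or_concat t with ht | ⟨t', x, ht⟩
        · subst ht
          rcases List.append_singleton_inj.mp (by simpa using hp) with ⟨-, hx⟩
          exact absurd hx.symm hc
        · subst ht
          rw [List.concat_eq_append] at hp hnd ⊢
          rw [show p ++ '.' :: (t' ++ [x]) = (p ++ '.' :: t') ++ [x] by simp] at hp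
          rcases List.append_singleton_inj.mp hp with ⟨hl, hx⟩
          subst hx
          have h' : l.foldl segStep none = some t' :=
            (ih t').mpr ⟨⟨p, hl⟩, fun hm => hnd (by simp [hm])⟩
          rw [h']
          rfl

-- the two literal extension tables agree up to the leading dot
theorem exts_map_toList : suspiciousExtA.map String.toList = suspiciousNamesB.map ('.' :: ·) := by
  decide

-- no suspicious name contains a dot
theorem suspiciousNamesB_no_dot : ∀ t ∈ suspiciousNamesB, '.' ∉ t := by
  decide

theorem a_eq_b (url : String) : has_suspicious_ext url = has_suspicious_ext_alt url := by
  unfold has_suspicious_ext has_suspicious_ext_alt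
  simp only [PySem.Str.endswith_eq, PySem.Str.toList_lower]
  set L : List Char := PySem.Chars.lower url.toList with hL
  have hcond : (suspiciousExtA.any (fun ext => PySem.Chars.endswith L ext.toList)) = true
      ↔ ∃ t ∈ suspiciousNamesB, ('.' :: t) <:+ L := by
    rw [List.any_eq_true]
    constructor
    · rintro ⟨e, he, hend⟩
      have hsuf : e.toList <:+ L := (PySem.Chars.endswith_iff L e.toList).mp hend
      have : e.toList ∈ suspiciousNamesB.map ('.' :: ·) := by
        rw [← exts_map_toList]; exact List.mem_map_of_mem he
      rcases List.mem_map.mp this with ⟨t, ht, hform⟩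
      exact ⟨t, ht, hform ▸ hsuf⟩
    · rintro ⟨t, ht, hsuf⟩
      have : ('.' :: t) ∈ suspiciousExtA.map String.toList := by
        rw [exts_map_toList]; exact List.mem_map_of_mem ht
      rcases List.mem_map.mp this with ⟨e, he, hform⟩
      exact ⟨e, he, (PySem.Chars.endswith_iff L e.toList).mpr (hform ▸ hsuf)⟩
  split_ifs with h
  · -- A returns 1: show B returns 1
    rcases hcond.mp h with ⟨t, ht, hsuf⟩
    have hseg : L.foldl segStep none = some t :=
      (foldl_segStep_eq_some_iff L t).mpr ⟨hsuf, suspiciousNamesB_no_dot t ht⟩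
    rw [hseg]
    show (1 : Int) = if suspiciousNamesB.contains t = true then 1 else 0
    rw [if_pos (by simpa using ht)]
  · -- A returns 0: show B returns 0
    rcases hseg : L.foldl segStep none with - | t
    · rfl
    · show (0 : Int) = if suspiciousNamesB.contains t = true then 1 else 0
      rw [if_neg]
      intro hmem
      have ht : t ∈ suspiciousNamesB := by simpa using hmem
      exact h (hcond.mpr ⟨t, ht, ((foldl_segStep_eq_some_iff L t).mp hseg).1⟩)

-- ===== VERDICT (by name: the statement is the Claim_ definition above) =====
theorem has_suspicious_ext_spec : Claim_equal_has_suspicious_ext := by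
  intro url _
  exact a_eq_b url
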